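-- pv_equiv track=rewrite | github.com/DataDog/datadog-agent | tasks/gotest.py | _minimize_bazel_patterns
-- ===== SOURCE A (Python) =====
-- def _minimize_bazel_patterns(patterns: list[str]) -> list[str]:
--     """Remove patterns that are already covered by a broader pattern in the list.
--
--     Patterns are of the form '//some/path/...' .  Pattern B is subsumed by
--     pattern A when B's directory starts with A's directory, e.g.:
--         //comp/core/... is subsumed by //comp/...
--         //pkg/util/log/... is subsumed by //pkg/...
--         //...  subsumes everything.
--
--     The input list may contain duplicates; the output will not.
--     """
--     # Sort lexicographically so shorter (broader) patterns come before the
--     # longer (narrower) ones they subsume.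
--     sorted_patterns = sorted(set(patterns))
--     result: list[str] = []
--     for pattern in sorted_patterns:
--         covered = any(kept == '//...' or pattern.startswith(kept[: -len('...')]) for kept in result)
--         if not covered:
--             result.append(pattern)
--     return result
-- ===== SOURCE B (Python) =====
-- def _minimize_bazel_patterns(patterns: list[str]) -> list[str]:
--     """Single pass over the sorted distinct patterns: because shared prefixes are
--     contiguous in lexicographic order, only the most recently kept pattern can
--     cover the next candidate."""
--     result: list[str] = []
--     last = None
--     for p in sorted(set(patterns)):
--         if last is None or not (last == '//...' or p.startswith(last[:-3])):
--             result.append(p)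
--             last = p
--     return result
-- ===== Notes on version B (the rewrite author's own statement) =====
-- stated objective: faster
-- what changed: Replaces A's per-candidate scan of the entire kept list with a single pass that compares each candidate only against the most recently kept pattern, relying on lexicographic contiguity of shared prefixes.
import Mathlib
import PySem

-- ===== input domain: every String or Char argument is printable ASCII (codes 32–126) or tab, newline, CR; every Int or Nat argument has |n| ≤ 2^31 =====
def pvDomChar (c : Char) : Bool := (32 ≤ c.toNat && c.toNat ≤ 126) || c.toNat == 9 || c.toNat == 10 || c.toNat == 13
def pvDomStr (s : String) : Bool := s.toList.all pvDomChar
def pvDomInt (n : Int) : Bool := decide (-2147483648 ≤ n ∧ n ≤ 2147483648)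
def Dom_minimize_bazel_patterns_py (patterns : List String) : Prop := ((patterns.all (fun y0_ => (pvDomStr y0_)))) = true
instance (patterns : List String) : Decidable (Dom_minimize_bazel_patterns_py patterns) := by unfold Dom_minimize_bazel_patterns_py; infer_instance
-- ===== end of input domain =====

-- B replaces A's scan of the whole kept list per candidate by a single pass that compares
-- each candidate only with the most recently kept pattern (objective: faster).

-- ===== PORT A =====
-- Port of A: sort the deduplicated patterns, keep a pattern unless some already-kept
-- pattern covers it ('//...' covers everything; otherwise prefix test on kept[:-3]).
def minimize_bazel_patterns_py (patterns : List String) : List String :=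
  let sorted_patterns := PySem.List.sorted (PySem.Set.ofList patterns) (fun x => x) false
  sorted_patterns.foldl
    (fun result pattern =>
      let covered := result.any (fun kept =>
        (kept == "//...") || PySem.Str.startswith pattern (PySem.Str.slice kept none (some (-3))))
      if !covered then result ++ [pattern] else result)
    []

-- ===== PORT B =====
-- Port of B: same sorted deduplicated sequence, but the loop state is (result, last kept);
-- a candidate is tested only against the last kept pattern.
def minimize_bazel_patterns_py_alt (patterns : List String) : List String :=
  ((PySem.List.sorted (PySem.Set.ofList patterns) (fun x => x) false).foldl
    (fun st p =>
      match st.2 with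
      | none => (st.1 ++ [p], some p)
      | some last =>
        if (last == "//...") || PySem.Str.startswith p (PySem.Str.slice last none (some (-3)))
        then st
        else (st.1 ++ [p], some p))
    ([], none)).1

-- ===== PRECONDITION & SPEC =====
def Spec_minimize_bazel_patterns_py (patterns : List String) (out : List String) : Prop := out = minimize_bazel_patterns_py_alt patterns
instance (patterns : List String) (out : List String) : Decidable (Spec_minimize_bazel_patterns_py patterns out) := by unfold Spec_minimize_bazel_patterns_py; infer_instance

-- ===== CLAIM (what is proved, stated in full; the proofs are below) =====
def Claim_equal_minimize_bazel_patterns_py : Prop := ∀ (patterns : List String), Dom_minimize_bazel_patterns_py patterns → Spec_minimize_bazel_patterns_py patterns (minimize_bazel_patterns_py patterns)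

-- ===== LEMMAS AND PROOFS =====

-- 'kept k covers candidate p' — the test both programs perform.
def pvCov (k p : String) : Bool :=
  (k == "//...") || PySem.Str.startswith p (PySem.Str.slice k none (some (-3)))

-- If q is a common prefix of x and z, it is a prefix of everything lexicographically between them.
theorem pv_prefix_sandwich (q x y z : List Char) (hx : q <+: x) (hz : q <+: z)
    (hxy : x < y) (hyz : y < z) : q <+: y := by
  induction q generalizing x y z with
  | nil => exact List.nil_prefix
  | cons c q ih =>
    obtain ⟨x', rfl⟩ := hx
    obtain ⟨z', rfl⟩ := hz
    cases y with
    | nil => simp [List.cons_append] at hxy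
    | cons d y' =>
      rw [List.cons_append, List.cons_lt_cons_iff] at hxy
      rw [List.cons_append, List.cons_lt_cons_iff] at hyz
      rcases hxy with h1 | ⟨rfl, h1⟩ <;> rcases hyz with h2 | ⟨h2e, h2⟩
      · exact absurd (h1.trans h2) (lt_irrefl _)
      · exact absurd h1 (h2e ▸ lt_irrefl _)
      · exact absurd h2 (lt_irrefl _)
      · exact List.cons_prefix_cons.mpr
          ⟨rfl, ih _ _ _ (q.prefix_append x') (q.prefix_append z') h1 h2⟩

-- The String slice k[:-3] on the character level.
theorem pv_slice3_toList (s : String) :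
    (PySem.Str.slice s none (some (-3))).toList = s.toList.take (s.toList.length - 3) := by
  simp [PySem.Str.slice]
  rw [PySem.List.slice_to_neg_ofNat _ 3 (by omega)]
  simp

-- If a does not cover the closer b, it cannot cover the farther p either.
theorem pv_cov_contra (a b p : String) (hab : a < b) (hbp : b < p)
    (hc : pvCov a b = false) : pvCov a p = false := by
  unfold pvCov at *
  simp only [Bool.or_eq_false_iff, PySem.Str.startswith_eq] at hc ⊢
  refine ⟨hc.1, ?_⟩
  by_contra hcon
  rw [Bool.not_eq_false, PySem.Chars.startswith_iff, pv_slice3_toList] at hcon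
  have hb : (a.toList.take (a.toList.length - 3)) <+: b.toList :=
    pv_prefix_sandwich _ _ _ _ (List.take_prefix _ _) hcon
      (String.lt_iff_toList_lt.mp hab) (String.lt_iff_toList_lt.mp hbp)
  have h2 := hc.2
  rw [pv_slice3_toList] at h2
  rw [← PySem.Chars.startswith_iff] at hb
  rw [h2] at hb
  exact Bool.false_ne_true hb

-- On an invariant-respecting kept list, A's whole-list scan equals B's last-element test.
theorem pv_any_eq_last (res : List String) (p : String)
    (hinv : res.Pairwise (fun a b => a < b ∧ pvCov a b = false))
    (hlt : ∀ k ∈ res, k < p) :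
    (res.any fun k => pvCov k p)
      = (match res.getLast? with | none => false | some l => pvCov l p) := by
  induction res with
  | nil => rfl
  | cons a res ih =>
    cases res with
    | nil => simp
    | cons b t =>
      have hab := (List.pairwise_cons.mp hinv).1 b (by simp)
      have hca : pvCov a p = false :=
        pv_cov_contra a b p hab.1 (hlt b (by simp)) hab.2
      have := ih (List.pairwise_cons.mp hinv).2 (fun k hk => hlt k (by simp [hk]))
      simp only [List.any_cons, hca, Bool.false_or, this]
      rfl

-- Main loop correspondence between A's fold and B's fold.
theorem pv_loop_eq (l res : List String)
    (hl : l.Pairwise (· < ·))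
    (hinv : res.Pairwise (fun a b => a < b ∧ pvCov a b = false))
    (hcross : ∀ k ∈ res, ∀ p ∈ l, k < p) :
    (l.foldl
      (fun result pattern =>
        let covered := result.any (fun kept =>
          (kept == "//...") || PySem.Str.startswith pattern (PySem.Str.slice kept none (some (-3))))
        if !covered then result ++ [pattern] else result)
      res)
    = (l.foldl
        (fun st p =>
          match st.2 with
          | none => (st.1 ++ [p], some p)
          | some last =>
            if (last == "//...") || PySem.Str.startswith p (PySem.Str.slice last none (some (-3)))
            then st
            else (st.1 ++ [p], some p))
        (res, res.getLast?)).1 := by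
  induction l generalizing res with
  | nil => rfl
  | cons p l ih =>
    have hl' := List.pairwise_cons.mp hl
    have hlt : ∀ k ∈ res, k < p := fun k hk => hcross k hk p (by simp)
    have hany : (res.any fun k => pvCov k p)
        = (match res.getLast? with | none => false | some last => pvCov last p) :=
      pv_any_eq_last res p hinv hlt
    have happ : res.any (fun k => pvCov k p) = false →
        List.foldl
          (fun result pattern =>
            let covered := result.any (fun kept =>
              (kept == "//...") || PySem.Str.startswith pattern (PySem.Str.slice kept none (some (-3))))
            if !covered then result ++ [pattern] else result)
          (res ++ [p]) l
        = (List.foldl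
            (fun st q =>
              match st.2 with
              | none => (st.1 ++ [q], some q)
              | some last =>
                if (last == "//...") || PySem.Str.startswith q (PySem.Str.slice last none (some (-3)))
                then st
                else (st.1 ++ [q], some q))
            (res ++ [p], some p) l).1 := by
      intro h
      have hmem : ∀ a ∈ res, pvCov a p = false := by
        intro a ha
        simpa using List.any_eq_false.mp h a ha
      have hinv' : (res ++ [p]).Pairwise (fun a b => a < b ∧ pvCov a b = false) := by
        rw [List.pairwise_append]
        refine ⟨hinv, by simp, ?_⟩
        intro a ha b hb
        simp only [List.mem_singleton] at hb
        subst hb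
        exact ⟨hlt a ha, hmem a ha⟩
      have hcross' : ∀ k ∈ res ++ [p], ∀ q ∈ l, k < q := by
        intro k hk q hq
        rcases List.mem_append.mp hk with hk | hk
        · exact hcross k hk q (by simp [hq])
        · simp only [List.mem_singleton] at hk
          subst hk
          exact hl'.1 q hq
      have := ih (res ++ [p]) hl'.2 hinv' hcross'
      rwa [List.getLast?_concat] at this
    simp only [List.foldl_cons]
    show List.foldl _ (if !(res.any fun k => pvCov k p) then res ++ [p] else res) l = _
    cases hres : res.getLast? with
    | none =>
      have hresnil : res = [] := List.getLast?_eq_none_iff.mp hres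
      subst hresnil
      simpa using happ (by simp)
    | some last =>
      have hany2 : (res.any fun k => pvCov k p) = pvCov last p := by
        rw [hres] at hany; exact hany
      rw [hany2]
      show _ = (List.foldl _
          (if (last == "//...") || PySem.Str.startswith p (PySem.Str.slice last none (some (-3)))
           then (res, some last) else (res ++ [p], some p)) l).1
      by_cases hc : pvCov last p = true
      · have hc' : ((last == "//...") || PySem.Str.startswith p (PySem.Str.slice last none (some (-3)))) = true := hc
        rw [hc, hc']
        simp only [Bool.not_true, Bool.false_eq_true, if_false, if_true]
        have hih := ih res hl'.2 hinv (fun k hk q hq => hcross k hk q (by simp [hq]))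
        rw [hres] at hih
        exact hih
      · rw [Bool.not_eq_true] at hc
        have hc' : ((last == "//...") || PySem.Str.startswith p (PySem.Str.slice last none (some (-3)))) = false := hc
        rw [hc, hc']
        simp only [Bool.not_false, if_true, Bool.false_eq_true, if_false]
        exact happ (hany2.trans hc)

-- ===== VERDICT (by name: the statement is the Claim_ definition above) =====
theorem minimize_bazel_patterns_py_spec : Claim_equal_minimize_bazel_patterns_py := by
  intro patterns _
  unfold Spec_minimize_bazel_patterns_py minimize_bazel_patterns_py minimize_bazel_patterns_py_alt
  exact pv_loop_eq _ [] (PySem.List.sorted_ofList_pairwise_lt _) (by simp) (by simp)
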